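-- pv_equiv track=rewrite | github.com/Thriambak/Riscv-Accelerator-and-compiler-optimisations-for-edge-AI | llvm-patches/apply_xava_patches_to_llvm20.py | strip_xava_block
-- ===== SOURCE A (Python) =====
-- XAVA_MARKER = "// === AVA-XAVA-PATCH ==="
--
-- def strip_xava_block(content):
--     """Remove any lines between XAVA_MARKER blocks (inclusive)."""
--     lines = content.split('\n')
--     out, inside = [], False
--     for line in lines:
--         if XAVA_MARKER in line:
--             inside = not inside
--             continue
--         if not inside:
--             out.append(line)
--     return '\n'.join(out)
-- ===== SOURCE B (Python) =====
-- XAVA_MARKER = "// === AVA-XAVA-PATCH ==="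
--
-- def strip_xava_block(content):
--     """Remove any lines between XAVA_MARKER blocks (inclusive)."""
--     lines = content.split('\n')
--     kept = []
--     i, n = 0, len(lines)
--     while i < n:
--         if XAVA_MARKER in lines[i]:
--             # skip ahead past the closing marker (or to the end)
--             i += 1
--             while i < n and XAVA_MARKER not in lines[i]:
--                 i += 1
--             i += 1
--         else:
--             kept.append(lines[i])
--             i += 1
--     return '\n'.join(kept)
-- ===== Notes on version B (the rewrite author's own statement) =====
-- stated objective: alternative
-- what changed: Replaces A's single streaming pass with an inside-flag toggle by a skip-ahead scan: on a marker line it jumps past the closing marker with an inner scan, keeping lines only in the outer loop, so no boolean state is carried.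
import Mathlib
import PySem

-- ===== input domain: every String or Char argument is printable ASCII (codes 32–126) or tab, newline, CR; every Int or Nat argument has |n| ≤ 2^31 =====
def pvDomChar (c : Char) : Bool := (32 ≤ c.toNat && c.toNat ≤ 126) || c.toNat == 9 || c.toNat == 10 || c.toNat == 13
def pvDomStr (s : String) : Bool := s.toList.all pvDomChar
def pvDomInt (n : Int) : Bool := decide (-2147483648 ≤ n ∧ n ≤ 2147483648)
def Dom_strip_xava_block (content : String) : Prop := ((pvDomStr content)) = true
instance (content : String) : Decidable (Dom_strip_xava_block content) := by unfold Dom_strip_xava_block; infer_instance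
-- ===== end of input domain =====

-- B replaces A's streaming inside-flag toggle with a skip-ahead scan (on a marker line, jump past the
-- closing marker), a different decomposition of the same task; equal cost, no speed claim.

-- ===== PORT A =====
def xavaMarker : String := "// === AVA-XAVA-PATCH ==="

-- A's for-loop over lines with state (out, inside); 'continue' on the marker branch.
def strip_xava_block (content : String) : String :=
  let lines := (PySem.Str.split? content "\n").getD []
  let st := lines.foldl (fun (st : List String × Bool) line =>
      if PySem.Str.isIn xavaMarker line then (st.1, !st.2)
      else if !st.2 then (st.1 ++ [line], st.2) else st) ([], false)
  PySem.Str.join "\n" st.1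

-- ===== PORT B =====
-- Source B's inner while: advance past lines until (and including) the next marker line.
def pvDropBlock : List String → List String
  | [] => []
  | l :: ls => if PySem.Str.isIn xavaMarker l then ls else pvDropBlock ls

theorem pvDropBlock_length_le (ls : List String) : (pvDropBlock ls).length ≤ ls.length := by
  induction ls with
  | nil => simp [pvDropBlock]
  | cons l ls ih => simp only [pvDropBlock]; split
                    · simp
                    · simp only [List.length_cons]; omega

-- Source B's outer while over the remaining lines: keep a non-marker line, skip ahead on a marker.
def pvStripGo (lines : List String) : List String :=
  match lines with
  | [] => []
  | l :: ls =>
      if PySem.Str.isIn xavaMarker l then pvStripGo (pvDropBlock ls)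
      else l :: pvStripGo ls
termination_by lines.length
decreasing_by
  · have := pvDropBlock_length_le ls; simp; omega
  · simp

def strip_xava_block_alt (content : String) : String :=
  let lines := (PySem.Str.split? content "\n").getD []
  PySem.Str.join "\n" (pvStripGo lines)

-- ===== PRECONDITION & SPEC =====
def Spec_strip_xava_block (content : String) (out : String) : Prop := out = strip_xava_block_alt content
instance (content : String) (out : String) : Decidable (Spec_strip_xava_block content out) := by unfold Spec_strip_xava_block; infer_instance

-- ===== CLAIM (what is proved, stated in full; the proofs are below) =====
def Claim_equal_strip_xava_block : Prop := ∀ (content : String), Dom_strip_xava_block content → Spec_strip_xava_block content (strip_xava_block content)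

-- ===== LEMMAS AND PROOFS =====
-- A's loop body, named for the proofs.
def pvStepA (st : List String × Bool) (line : String) : List String × Bool :=
  if PySem.Str.isIn xavaMarker line then (st.1, !st.2)
  else if !st.2 then (st.1 ++ [line], st.2) else st

-- Invariant tying A's inside flag to B's skip-ahead structure, both flag values at once.
theorem pvLoop_eq (ls : List String) :
    (∀ acc, (ls.foldl pvStepA (acc, false)).1 = acc ++ pvStripGo ls) ∧
    (∀ acc, (ls.foldl pvStepA (acc, true)).1 = acc ++ pvStripGo (pvDropBlock ls)) := by
  induction ls with
  | nil => simp [pvStripGo, pvDropBlock]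
  | cons l ls ih =>
    constructor <;> intro acc <;>
      by_cases h : PySem.Chars.isIn xavaMarker.toList l.toList = true <;>
      simp [pvStepA, pvStripGo, pvDropBlock, h, ih.1, ih.2]

-- ===== VERDICT (by name: the statement is the Claim_ definition above) =====
theorem strip_xava_block_spec : Claim_equal_strip_xava_block := by
  intro content _
  show PySem.Str.join "\n"
      (List.foldl pvStepA ([], false) ((PySem.Str.split? content "\n").getD [])).1
    = strip_xava_block_alt content
  rw [(pvLoop_eq _).1 []]
  rfl
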